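-- pv_equiv track=rewrite | github.com/juijeong8324/algorithm_study | Greedy/programmers/[Lv3] 숫자 게임/main.py | solution
-- ===== SOURCE A (Python) =====
-- def solution(A, B):
--     answer = 0
--     N = len(A)
--
--     # 정렬
--     A = sorted(A)
--     B = sorted(B)
--     i = 0
--     j = 0
--
--     while i < N and j < N:
--         if B[j] > A[i]: # B팀의 현재 최솟값으로 A팀의 현재 최솟값을 이길 수 있으면 승리
--             answer += 1
--             j += 1 #
--             i += 1
--         else: # B팀의 현재 선수로는 이길 수 없으면, B팀의 다음 선수 시도
--             j += 1
--
--     return answer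
-- ===== SOURCE B (Python) =====
-- def solution(A, B):
--     # Descending counter sweep: walk A's players from strongest to weakest,
--     # banking every fielded B player strictly stronger than the current A player,
--     # and spend one banked B player per beatable A player.
--     n = len(A)
--     bs = sorted(B)[:n]          # B fields its n weakest players (as A's j < N loop bound does)
--     k = len(bs)                 # bs[k:] have already been banked
--     avail = 0                   # banked B players not yet used
--     ans = 0
--     for a in sorted(A, reverse=True):
--         while k > 0 and bs[k - 1] > a:
--             k -= 1
--             avail += 1
--         if avail > 0:
--             ans += 1
--             avail -= 1
--     return ans
-- ===== Notes on version B (the rewrite author's own statement) =====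
-- stated objective: alternative
-- what changed: Replaces the ascending two-pointer scan (advance j on skip, both pointers on win) by a descending counter sweep: walk A's players strongest-first, bank every fielded B player strictly stronger than the current A player in a counter, and spend one banked B player per beatable A player.
import Mathlib
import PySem

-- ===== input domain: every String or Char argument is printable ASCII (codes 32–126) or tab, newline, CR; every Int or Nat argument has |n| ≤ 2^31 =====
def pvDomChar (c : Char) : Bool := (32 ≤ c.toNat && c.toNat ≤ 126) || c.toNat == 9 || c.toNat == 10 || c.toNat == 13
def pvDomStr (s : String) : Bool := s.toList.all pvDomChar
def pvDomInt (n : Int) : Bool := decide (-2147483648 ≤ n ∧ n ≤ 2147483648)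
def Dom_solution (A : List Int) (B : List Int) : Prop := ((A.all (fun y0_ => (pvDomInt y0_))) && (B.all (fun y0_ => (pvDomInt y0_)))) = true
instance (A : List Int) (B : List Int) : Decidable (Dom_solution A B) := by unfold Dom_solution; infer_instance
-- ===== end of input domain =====

-- B replaces A's ascending two-pointer scan by a descending counter sweep (an alternative
-- algorithm of the same cost); return-value equivalence is proved on len(A) ≤ len(B).

-- ===== PORT A =====
-- the 'while i < N and j < N' loop of A; B[j]/A[i] via pyGet? (none = IndexError, outside Pre_)
def solutionLoop (sa sb : List Int) (N : Nat) : Nat → Nat → Nat → Int → Int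
  | 0, _, _, answer => answer
  | fuel + 1, i, j, answer =>
    if i < N ∧ j < N then
      match PySem.List.pyGet? sb (j : Int), PySem.List.pyGet? sa (i : Int) with
      | some bj, some ai =>
          if bj > ai then solutionLoop sa sb N fuel (i+1) (j+1) (answer+1)
          else solutionLoop sa sb N fuel i (j+1) answer
      | _, _ => answer
    else answer

def solution (A : List Int) (B : List Int) : Int :=
  let N := A.length
  let sa := PySem.List.sorted A (fun x => x) false
  let sb := PySem.List.sorted B (fun x => x) false
  solutionLoop sa sb N N 0 0 0

-- ===== PORT B =====
-- the inner 'while k > 0 and bs[k-1] > a' loop of B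
def bInner (bs : List Int) (a : Int) : Nat → Nat → Nat × Nat
  | 0, avail => (0, avail)
  | k + 1, avail =>
    if PySem.List.pyGetD bs (((k : Int) + 1) - 1) 0 > a then bInner bs a k (avail + 1)
    else (k + 1, avail)

def solution_alt (A : List Int) (B : List Int) : Int :=
  let n := A.length
  let bs := PySem.List.slice (PySem.List.sorted B (fun x => x) false) none (some (n : Int))
  let sad := PySem.List.sorted A (fun x => x) true
  (sad.foldl
    (fun (st : Nat × Nat × Int) a =>
      let p := bInner bs a st.1 st.2.1
      if 0 < p.2 then (p.1, p.2 - 1, st.2.2 + 1) else (p.1, p.2, st.2.2))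
    (bs.length, 0, (0 : Int))).2.2

-- ===== PRECONDITION & SPEC =====
-- Pre_ excludes exactly the inputs with len(B) < len(A), on which A's loop (bounded by len(A)
-- for both arrays) raises IndexError at B[j].
def Pre_solution (A : List Int) (B : List Int) : Prop := A.length ≤ B.length
instance (A : List Int) (B : List Int) : Decidable (Pre_solution A B) := by unfold Pre_solution; infer_instance
def pvWitness_solution : List Int × List Int := ([1], [2])

def Spec_solution (A : List Int) (B : List Int) (out : Int) : Prop := out = solution_alt A B
instance (A : List Int) (B : List Int) (out : Int) : Decidable (Spec_solution A B out) := by unfold Spec_solution; infer_instance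

-- ===== CLAIM (what is proved, stated in full; the proofs are below) =====
def Claim_equal_solution : Prop := ∀ (A : List Int) (B : List Int), Dom_solution A B → Pre_solution A B → Spec_solution A B (solution A B)

-- ===== LEMMAS AND PROOFS =====

-- Tag world: a merged line-up as a list of tags, `true` = a B player, `false` = an A player.
def cT : List Bool → Int
  | [] => 0
  | b :: t => (if b then 1 else 0) + cT t

def cF : List Bool → Int
  | [] => 0
  | b :: t => (if b then 0 else 1) + cF t

-- prefix maximum of (#true - #false)
def MT : List Bool → Int
  | [] => 0
  | b :: t => max 0 ((if b then 1 else -1) + MT t)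

-- prefix maximum of (#false - #true)
def MS : List Bool → Int
  | [] => 0
  | b :: t => max 0 ((if b then -1 else 1) + MS t)

-- forward sweep: A entries are banked, each B entry uses one banked A if available
def matchedF : Nat → List Bool → Int
  | _, [] => 0
  | a, false :: t => matchedF (a + 1) t
  | a, true :: t => if 0 < a then 1 + matchedF (a - 1) t else matchedF a t

-- swapped sweep: B entries are banked, each A entry uses one banked B if available
def matchedS : Nat → List Bool → Int
  | _, [] => 0
  | a, true :: t => matchedS (a + 1) t
  | a, false :: t => if 0 < a then 1 + matchedS (a - 1) t else matchedS a t

-- ascending merge of two ascending lists, B before A at equal values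
def mergeA : List Int → List Int → List Bool
  | [], bs => List.replicate bs.length true
  | a :: as, [] => List.replicate (a :: as).length false
  | a :: as, b :: bs => if b ≤ a then true :: mergeA (a :: as) bs else false :: mergeA as (b :: bs)
  termination_by as bs => as.length + bs.length

-- descending merge of two descending lists, A before B at equal values
def mergeD : List Int → List Int → List Bool
  | [], bs => List.replicate bs.length true
  | a :: as, [] => List.replicate (a :: as).length false
  | a :: as, b :: bs => if b > a then true :: mergeD (a :: as) bs else false :: mergeD as (b :: bs)
  termination_by as bs => as.length + bs.length

-- A's two-pointer greedy, with `avail` phantom A players smaller than everything in bs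
def tp' : Nat → List Int → List Int → Int
  | _, _, [] => 0
  | Nat.succ av, as, _ :: bs => 1 + tp' av as bs
  | 0, [], _ :: bs => tp' 0 [] bs
  | 0, a :: as, b :: bs => if b > a then 1 + tp' 0 as bs else tp' 0 (a :: as) bs

-- B's descending sweep over two descending lists
def dw : List Int → List Int → Nat → Int
  | [], _, _ => 0
  | _ :: as, [], avail => if 0 < avail then 1 + dw as [] (avail - 1) else dw as [] avail
  | a :: as, b :: bs, avail =>
      if b > a then dw (a :: as) bs (avail + 1)
      else if 0 < avail then 1 + dw as (b :: bs) (avail - 1) else dw as (b :: bs) avail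
  termination_by as bs _ => as.length + bs.length

theorem MT_nonneg (t : List Bool) : 0 ≤ MT t := by
  cases t <;> simp [MT]

theorem MS_nonneg (t : List Bool) : 0 ≤ MS t := by
  cases t <;> simp [MS]

theorem charF (t : List Bool) : ∀ a : Nat, matchedF a t = cT t - max 0 (MT t - a) := by
  induction t with
  | nil => intro a; simp [matchedF, cT, MT]
  | cons b t ih =>
    intro a
    have hnn := MT_nonneg t
    cases b with
    | false =>
      have e1 : matchedF a (false :: t) = matchedF (a + 1) t := by simp [matchedF]
      have e2 : cT (false :: t) = cT t := by simp [cT]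
      have e3 : MT (false :: t) = max 0 (-1 + MT t) := by simp [MT]
      rw [e1, e2, e3, ih (a + 1)]
      omega
    | true =>
      have e1 : matchedF a (true :: t) =
          if 0 < a then 1 + matchedF (a - 1) t else matchedF a t := by simp [matchedF]
      have e2 : cT (true :: t) = 1 + cT t := by simp [cT]
      have e3 : MT (true :: t) = max 0 (1 + MT t) := by simp [MT]
      rw [e1, e2, e3]
      rcases Nat.eq_zero_or_pos a with ha | ha
      · subst ha
        rw [if_neg (lt_irrefl 0), ih 0]
        omega
      · rw [if_pos ha, ih (a - 1)]
        omega

theorem charS (t : List Bool) : ∀ a : Nat, matchedS a t = cF t - max 0 (MS t - a) := by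
  induction t with
  | nil => intro a; simp [matchedS, cF, MS]
  | cons b t ih =>
    intro a
    have hnn := MS_nonneg t
    cases b with
    | true =>
      have e1 : matchedS a (true :: t) = matchedS (a + 1) t := by simp [matchedS]
      have e2 : cF (true :: t) = cF t := by simp [cF]
      have e3 : MS (true :: t) = max 0 (-1 + MS t) := by simp [MS]
      rw [e1, e2, e3, ih (a + 1)]
      omega
    | false =>
      have e1 : matchedS a (false :: t) =
          if 0 < a then 1 + matchedS (a - 1) t else matchedS a t := by simp [matchedS]
      have e2 : cF (false :: t) = 1 + cF t := by simp [cF]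
      have e3 : MS (false :: t) = max 0 (1 + MS t) := by simp [MS]
      rw [e1, e2, e3]
      rcases Nat.eq_zero_or_pos a with ha | ha
      · subst ha
        rw [if_neg (lt_irrefl 0), ih 0]
        omega
      · rw [if_pos ha, ih (a - 1)]
        omega

theorem cT_append (s u : List Bool) : cT (s ++ u) = cT s + cT u := by
  induction s with
  | nil => simp [cT]
  | cons b s ih => simp only [List.cons_append, cT, ih]; omega

theorem cF_append (s u : List Bool) : cF (s ++ u) = cF s + cF u := by
  induction s with
  | nil => simp [cF]
  | cons b s ih => simp only [List.cons_append, cF, ih]; omega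

theorem cT_reverse (t : List Bool) : cT t.reverse = cT t := by
  induction t with
  | nil => rfl
  | cons b t ih => simp only [List.reverse_cons, cT_append, ih, cT]; omega

theorem cF_reverse (t : List Bool) : cF t.reverse = cF t := by
  induction t with
  | nil => rfl
  | cons b t ih => simp only [List.reverse_cons, cF_append, ih, cF]; omega

theorem MS_concat (s : List Bool) (y : Bool) :
    MS (s ++ [y]) = max (MS s) (cF s - cT s + (if y then -1 else 1)) := by
  induction s with
  | nil => cases y <;> simp [MS, cF, cT]
  | cons x s ih =>
    simp only [List.cons_append, MS, ih, cF, cT]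
    cases x <;> cases y <;> simp <;> omega

theorem MS_reverse (t : List Bool) : MS t.reverse = cF t - cT t + MT t := by
  induction t with
  | nil => simp [MS, cF, cT, MT]
  | cons x t ih =>
    have hMT := MT_nonneg t
    simp only [List.reverse_cons, MS_concat, cF_reverse, cT_reverse, ih, cF, cT, MT]
    cases x <;> simp <;> omega

theorem ballot (t : List Bool) (h : cT t = cF t) : matchedF 0 t = matchedS 0 t.reverse := by
  have h1 := charF t 0
  have h2 := charS t.reverse 0
  have h3 := MS_reverse t
  have h4 := MT_nonneg t
  rw [h1, h2, h3, cF_reverse]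
  omega

theorem mergeA_nil_left (bs : List Int) : mergeA [] bs = List.replicate bs.length true := by
  simp [mergeA]

theorem mergeA_nil_right (l : List Int) : mergeA l [] = List.replicate l.length false := by
  cases l <;> simp [mergeA]

theorem mergeA_cons_cons (a b : Int) (as bs : List Int) :
    mergeA (a :: as) (b :: bs) =
      if b ≤ a then true :: mergeA (a :: as) bs else false :: mergeA as (b :: bs) := by
  simp only [mergeA]

theorem mergeD_nil_left (bs : List Int) : mergeD [] bs = List.replicate bs.length true := by
  simp [mergeD]

theorem mergeD_nil_right (l : List Int) : mergeD l [] = List.replicate l.length false := by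
  cases l <;> simp [mergeD]

theorem mergeD_cons_cons (a b : Int) (as bs : List Int) :
    mergeD (a :: as) (b :: bs) =
      if b > a then true :: mergeD (a :: as) bs else false :: mergeD as (b :: bs) := by
  simp only [mergeD]

theorem cT_replicate_true (n : Nat) : cT (List.replicate n true) = n := by
  induction n with
  | zero => rfl
  | succ n ih => simp [List.replicate_succ, cT, ih]; omega

theorem cT_replicate_false (n : Nat) : cT (List.replicate n false) = 0 := by
  induction n with
  | zero => rfl
  | succ n ih => simp [List.replicate_succ, cT, ih]

theorem cF_replicate_true (n : Nat) : cF (List.replicate n true) = 0 := by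
  induction n with
  | zero => rfl
  | succ n ih => simp [List.replicate_succ, cF, ih]

theorem cF_replicate_false (n : Nat) : cF (List.replicate n false) = n := by
  induction n with
  | zero => rfl
  | succ n ih => simp [List.replicate_succ, cF, ih]; omega

theorem cT_mergeA (n : Nat) : ∀ (as bs : List Int), as.length + bs.length = n →
    cT (mergeA as bs) = bs.length := by
  induction n using Nat.strong_induction_on with
  | _ n IH =>
    intro as bs hlen
    match as, bs with
    | as, [] => rw [mergeA_nil_right, cT_replicate_false]; rfl
    | [], b :: bs => rw [mergeA_nil_left, cT_replicate_true]
    | a :: as, b :: bs =>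
      rw [mergeA_cons_cons]
      by_cases hba : b ≤ a
      · rw [if_pos hba]
        simp only [cT]
        rw [IH (as.length + 1 + bs.length) (by simp at hlen ⊢; omega) (a :: as) bs (by simp)]
        simp; omega
      · rw [if_neg hba]
        simp only [cT]
        rw [IH (as.length + (bs.length + 1)) (by simp at hlen ⊢; omega) as (b :: bs) (by simp)]
        simp

theorem cF_mergeA (n : Nat) : ∀ (as bs : List Int), as.length + bs.length = n →
    cF (mergeA as bs) = as.length := by
  induction n using Nat.strong_induction_on with
  | _ n IH =>
    intro as bs hlen
    match as, bs with
    | as, [] => rw [mergeA_nil_right, cF_replicate_false]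
    | [], b :: bs => rw [mergeA_nil_left, cF_replicate_true]; rfl
    | a :: as, b :: bs =>
      rw [mergeA_cons_cons]
      by_cases hba : b ≤ a
      · rw [if_pos hba]
        simp only [cF]
        rw [IH (as.length + 1 + bs.length) (by simp at hlen ⊢; omega) (a :: as) bs (by simp)]
        simp
      · rw [if_neg hba]
        simp only [cF]
        rw [IH (as.length + (bs.length + 1)) (by simp at hlen ⊢; omega) as (b :: bs) (by simp)]
        simp; omega

theorem tp'_zero_nil (bs : List Int) : tp' 0 [] bs = 0 := by
  induction bs with
  | nil => rfl
  | cons b bs ih => simp [tp', ih]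

theorem tp'_nil_right (avail : Nat) (as : List Int) : tp' avail as [] = 0 := by
  cases avail <;> cases as <;> rfl

theorem matchedF_replicate_false (n : Nat) : ∀ avail : Nat,
    matchedF avail (List.replicate n false) = 0 := by
  induction n with
  | zero => intro avail; rfl
  | succ n ih => intro avail; rw [List.replicate_succ]; exact ih (avail + 1)

theorem matchedS_replicate_true (n : Nat) : ∀ avail : Nat,
    matchedS avail (List.replicate n true) = 0 := by
  induction n with
  | zero => intro avail; rfl
  | succ n ih => intro avail; rw [List.replicate_succ]; exact ih (avail + 1)

theorem phantomize (a : Int) : ∀ (bs : List Int), (∀ c ∈ bs, a < c) →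
    ∀ (avail : Nat) (as : List Int), tp' avail (a :: as) bs = tp' (avail + 1) as bs := by
  intro bs
  induction bs with
  | nil => intro _ avail as; simp [tp'_nil_right]
  | cons c cs ih =>
    intro hlt avail as
    have hac : a < c := hlt c List.mem_cons_self
    have hcs : ∀ x ∈ cs, a < x := fun x hx => hlt x (List.mem_cons_of_mem _ hx)
    cases avail with
    | zero => simp [tp', hac]
    | succ v =>
      show 1 + tp' v (a :: as) cs = 1 + tp' (v + 1) as cs
      rw [ih hcs v as]

theorem TPM (n : Nat) : ∀ (as bs : List Int), as.length + bs.length = n →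
    bs.Pairwise (· ≤ ·) → ∀ avail : Nat, matchedF avail (mergeA as bs) = tp' avail as bs := by
  induction n using Nat.strong_induction_on with
  | _ n IH =>
    intro as bs hlen hbs avail
    match as, bs with
    | as, [] =>
      rw [mergeA_nil_right, matchedF_replicate_false, tp'_nil_right]
    | [], b :: bs =>
      have hrec := IH (0 + bs.length) (by simp at hlen ⊢; omega) [] bs (by simp)
        (List.Pairwise.of_cons hbs)
      rw [mergeA_nil_left, List.length_cons, List.replicate_succ]
      cases avail with
      | zero =>
        show matchedF 0 (true :: List.replicate bs.length true) = tp' 0 [] (b :: bs)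
        simp only [matchedF, if_neg (lt_irrefl 0)]
        rw [← mergeA_nil_left, hrec 0]
        rfl
      | succ v =>
        show matchedF (v + 1) (true :: List.replicate bs.length true) = tp' (v + 1) [] (b :: bs)
        simp only [matchedF, if_pos (Nat.succ_pos v), Nat.add_sub_cancel]
        rw [← mergeA_nil_left, hrec v]
        rfl
    | a :: as, b :: bs =>
      rw [mergeA_cons_cons]
      by_cases hba : b ≤ a
      · rw [if_pos hba]
        have hrec := IH (as.length + 1 + bs.length) (by simp at hlen ⊢; omega) (a :: as) bs
          (by simp) (List.Pairwise.of_cons hbs)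
        cases avail with
        | zero =>
          simp only [matchedF, if_neg (lt_irrefl 0)]
          rw [hrec 0]
          show tp' 0 (a :: as) bs = tp' 0 (a :: as) (b :: bs)
          rw [show tp' 0 (a :: as) (b :: bs) = if b > a then 1 + tp' 0 as bs else tp' 0 (a :: as) bs
            from by simp only [tp']]
          rw [if_neg (by omega)]
        | succ v =>
          simp only [matchedF, if_pos (Nat.succ_pos v), Nat.add_sub_cancel]
          rw [hrec v]
          rfl
      · rw [if_neg hba]
        have hab : a < b := by omega
        have hrec := IH (as.length + (bs.length + 1)) (by simp at hlen ⊢; omega) as (b :: bs)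
          (by simp) hbs
        show matchedF avail (false :: mergeA as (b :: bs)) = tp' avail (a :: as) (b :: bs)
        simp only [matchedF]
        rw [hrec (avail + 1)]
        rw [phantomize a (b :: bs) ?hlt avail as]
        case hlt =>
          intro c hc
          rcases List.mem_cons.mp hc with rfl | hc
          · exact hab
          · have hb := (List.pairwise_cons.mp hbs).1 c hc
            omega

theorem merge_append (n : Nat) : ∀ (X Y : List Int) (a b : Int), X.length + Y.length = n →
    (∀ x ∈ X, x ≤ a) → (∀ y ∈ Y, y ≤ b) →
    mergeA (X ++ [a]) (Y ++ [b]) =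
      if b > a then mergeA (X ++ [a]) Y ++ [true] else mergeA X (Y ++ [b]) ++ [false] := by
  induction n using Nat.strong_induction_on with
  | _ n IH =>
    intro X Y a b hlen hX hY
    match X, Y with
    | [], [] =>
      by_cases hba : b > a
      · rw [if_pos hba]
        simp only [List.nil_append]
        rw [mergeA_cons_cons, if_neg (by omega), mergeA_nil_left, mergeA_nil_right]
        simp
      · rw [if_neg hba]
        simp only [List.nil_append]
        rw [mergeA_cons_cons, if_pos (by omega), mergeA_nil_right, mergeA_nil_left]
        simp
    | [], y :: Y' =>
      have hy : y ≤ b := hY y List.mem_cons_self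
      have hY' : ∀ z ∈ Y', z ≤ b := fun z hz => hY z (List.mem_cons_of_mem _ hz)
      by_cases hya : y ≤ a
      · have hrec := IH Y'.length (by simp at hlen ⊢; omega) [] Y' a b (by simp) hX hY'
        simp only [List.nil_append] at hrec ⊢
        rw [List.cons_append, mergeA_cons_cons, if_pos hya, hrec]
        by_cases hba : b > a
        · rw [if_pos hba, if_pos hba, mergeA_cons_cons, if_pos hya]
          simp
        · rw [if_neg hba, if_neg hba, mergeA_nil_left, mergeA_nil_left]
          simp [List.replicate_succ]
      · have hba : b > a := by omega
        rw [if_pos hba]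
        simp only [List.nil_append]
        rw [List.cons_append, mergeA_cons_cons, if_neg hya, mergeA_cons_cons, if_neg hya]
        rw [mergeA_nil_left, mergeA_nil_left]
        simp [← List.replicate_succ']
    | x :: X', Y =>
      have hx : x ≤ a := hX x List.mem_cons_self
      have hX' : ∀ z ∈ X', z ≤ a := fun z hz => hX z (List.mem_cons_of_mem _ hz)
      match Y with
      | [] =>
        by_cases hbx : b ≤ x
        · have hba : ¬ b > a := by omega
          rw [if_neg hba]
          simp only [List.nil_append]
          rw [List.cons_append, mergeA_cons_cons, if_pos hbx, mergeA_cons_cons, if_pos hbx]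
          rw [mergeA_nil_right, mergeA_nil_right]
          simp [← List.replicate_succ']
        · have hrec := IH X'.length (by simp at hlen ⊢; omega) X' [] a b (by simp) hX' hY
          simp only [List.nil_append] at hrec ⊢
          rw [List.cons_append, mergeA_cons_cons, if_neg hbx, hrec]
          by_cases hba : b > a
          · rw [if_pos hba, if_pos hba]
            simp [mergeA_nil_right, List.replicate_succ]
          · rw [if_neg hba, if_neg hba]
            rw [show mergeA (x :: X') [b] = false :: mergeA X' [b] from by
              rw [mergeA_cons_cons, if_neg hbx]]
            simp
      | y :: Y' =>
        have hy : y ≤ b := hY y List.mem_cons_self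
        have hY' : ∀ z ∈ Y', z ≤ b := fun z hz => hY z (List.mem_cons_of_mem _ hz)
        by_cases hyx : y ≤ x
        · have hrec := IH ((x :: X').length + Y'.length) (by simp at hlen ⊢; omega)
            (x :: X') Y' a b (by simp) hX hY'
          rw [List.cons_append, List.cons_append, mergeA_cons_cons, if_pos hyx]
          rw [← List.cons_append, hrec]
          by_cases hba : b > a
          · rw [if_pos hba, if_pos hba]
            rw [show mergeA (x :: X' ++ [a]) (y :: Y') = true :: mergeA (x :: X' ++ [a]) Y' from by
              rw [List.cons_append, mergeA_cons_cons, if_pos hyx]]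
            simp
          · rw [if_neg hba, if_neg hba]
            rw [show mergeA (x :: X') (y :: (Y' ++ [b])) = true :: mergeA (x :: X') (Y' ++ [b]) from by
              rw [mergeA_cons_cons, if_pos hyx]]
            simp
        · have hrec := IH (X'.length + ((y :: Y').length)) (by simp at hlen ⊢; omega)
            X' (y :: Y') a b (by simp) hX' hY
          rw [List.cons_append, List.cons_append, mergeA_cons_cons, if_neg hyx]
          rw [← List.cons_append, hrec]
          by_cases hba : b > a
          · rw [if_pos hba, if_pos hba]
            rw [show mergeA (x :: (X' ++ [a])) (y :: Y') = false :: mergeA (X' ++ [a]) (y :: Y') from by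
              rw [mergeA_cons_cons, if_neg hyx]]
            simp
          · rw [if_neg hba, if_neg hba]
            rw [show mergeA (x :: X') (y :: Y' ++ [b]) = false :: mergeA X' (y :: Y' ++ [b]) from by
              rw [List.cons_append, mergeA_cons_cons, if_neg hyx]]
            simp

theorem revmerge (n : Nat) : ∀ (as bs : List Int), as.length + bs.length = n →
    as.Pairwise (· ≤ ·) → bs.Pairwise (· ≤ ·) →
    mergeD as.reverse bs.reverse = (mergeA as bs).reverse := by
  induction n using Nat.strong_induction_on with
  | _ n IH =>
    intro as bs hlen has hbs
    rcases List.eq_nil_or_concat as with rfl | ⟨X, a, rfl⟩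
    · rw [List.reverse_nil, mergeD_nil_left, mergeA_nil_left]
      simp
    · rcases List.eq_nil_or_concat bs with rfl | ⟨Y, b, rfl⟩
      · simp only [List.concat_eq_append] at hlen has ⊢
        rw [List.reverse_nil, mergeD_nil_right, mergeA_nil_right]
        simp
      · simp only [List.concat_eq_append] at hlen has hbs ⊢
        have hXa : (X ++ [a]).reverse = a :: X.reverse := by simp
        have hYb : (Y ++ [b]).reverse = b :: Y.reverse := by simp
        have hXp : X.Pairwise (· ≤ ·) := (List.pairwise_append.mp has).1
        have hYp : Y.Pairwise (· ≤ ·) := (List.pairwise_append.mp hbs).1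
        have hXle : ∀ x ∈ X, x ≤ a := fun x hx =>
          (List.pairwise_append.mp has).2.2 x hx a List.mem_cons_self
        have hYle : ∀ y ∈ Y, y ≤ b := fun y hy =>
          (List.pairwise_append.mp hbs).2.2 y hy b List.mem_cons_self
        rw [hXa, hYb]
        rw [merge_append (X.length + Y.length) X Y a b rfl hXle hYle]
        by_cases hba : b > a
        · rw [if_pos hba, mergeD_cons_cons, if_pos hba]
          have hrec := IH ((X ++ [a]).length + Y.length) (by simp at hlen ⊢; omega)
            (X ++ [a]) Y (by simp) has hYp
          rw [hXa] at hrec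
          rw [hrec]
          simp
        · rw [if_neg hba, mergeD_cons_cons, if_neg hba]
          have hrec := IH (X.length + (Y ++ [b]).length) (by simp at hlen ⊢; omega)
            X (Y ++ [b]) (by simp) hXp hbs
          rw [hYb] at hrec
          rw [hrec]
          simp

theorem DWM (n : Nat) : ∀ (as bs : List Int), as.length + bs.length = n →
    ∀ avail : Nat, dw as bs avail = matchedS avail (mergeD as bs) := by
  induction n using Nat.strong_induction_on with
  | _ n IH =>
    intro as bs hlen avail
    match as, bs with
    | [], bs =>
      rw [mergeD_nil_left, matchedS_replicate_true]
      simp [dw]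
    | a :: as, [] =>
      have hrec := IH (as.length + 0) (by simp at hlen ⊢; omega) as [] (by simp)
      rw [show mergeD (a :: as) [] = false :: mergeD as [] from by
        rw [mergeD_nil_right, mergeD_nil_right]; rfl]
      simp only [dw, matchedS]
      by_cases h : 0 < avail
      · rw [if_pos h, if_pos h, hrec (avail - 1)]
      · rw [if_neg h, if_neg h, hrec avail]
    | a :: as, b :: bs =>
      rw [mergeD_cons_cons]
      by_cases hba : b > a
      · rw [if_pos hba]
        rw [show dw (a :: as) (b :: bs) avail = dw (a :: as) bs (avail + 1) from by
          simp only [dw]; rw [if_pos hba]]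
        rw [IH (as.length + 1 + bs.length) (by simp at hlen ⊢; omega) (a :: as) bs (by simp)
          (avail + 1)]
        rfl
      · rw [if_neg hba]
        rw [show dw (a :: as) (b :: bs) avail =
          if 0 < avail then 1 + dw as (b :: bs) (avail - 1) else dw as (b :: bs) avail from by
          simp only [dw]; rw [if_neg hba]]
        have hrec := IH (as.length + (bs.length + 1)) (by simp at hlen ⊢; omega) as (b :: bs)
          (by simp)
        simp only [matchedS]
        by_cases h : 0 < avail
        · rw [if_pos h, if_pos h, hrec (avail - 1)]
        · rw [if_neg h, if_neg h, hrec avail]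

theorem sorted_rev_eq (A : List Int) :
    PySem.List.sorted A (fun x => x) true = (PySem.List.sorted A (fun x => x) false).reverse := by
  have h : (PySem.List.sorted A (fun x => x) true).reverse = PySem.List.sorted A (fun x => x) false := by
    apply PySem.List.eq_of_perm_of_pairwise_le_of_injective (fun x : Int => x) (fun _ _ h => h)
    · exact ((PySem.List.sorted A (fun x => x) true).reverse_perm.trans
        (PySem.List.sorted_perm A (fun x => x) true)).trans
        (PySem.List.sorted_perm A (fun x => x) false).symm
    · rw [List.pairwise_reverse]
      exact PySem.List.sorted_pairwise_rev A (fun x => x)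
    · exact PySem.List.sorted_pairwise A (fun x => x)
  rw [← h, List.reverse_reverse]

theorem loopA_eq (sa sb : List Int) (N : Nat) (hsa : sa.length = N) (hsb : N ≤ sb.length) :
    ∀ (fuel i j : Nat) (answer : Int), N - j ≤ fuel →
      solutionLoop sa sb N fuel i j answer = answer + tp' 0 (sa.drop i) ((sb.take N).drop j) := by
  intro fuel
  induction fuel with
  | zero =>
    intro i j answer hf
    rw [show ((sb.take N).drop j : List Int) = [] from
      List.drop_eq_nil_of_le (by simp [List.length_take]; omega)]
    rw [tp'_nil_right]
    simp [solutionLoop]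
  | succ fuel ih =>
    intro i j answer hf
    by_cases hc : i < N ∧ j < N
    · have hjb : j < sb.length := by omega
      have hia : i < sa.length := by omega
      have hjN : j < (sb.take N).length := by simp [List.length_take]; omega
      have hget_b : PySem.List.pyGet? sb (j : Int) = some sb[j] := by
        rw [PySem.List.pyGet?_natCast]
        exact List.getElem?_eq_getElem hjb
      have hget_a : PySem.List.pyGet? sa (i : Int) = some sa[i] := by
        rw [PySem.List.pyGet?_natCast]
        exact List.getElem?_eq_getElem hia
      have hdropa : sa.drop i = sa[i] :: sa.drop (i + 1) := by
        rw [List.drop_eq_getElem_cons hia]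
      have hdropb : (sb.take N).drop j = sb[j] :: (sb.take N).drop (j + 1) := by
        rw [List.drop_eq_getElem_cons hjN]
        congr 1
        exact List.getElem_take
      rw [solutionLoop, if_pos hc, hget_b, hget_a]
      rw [hdropa, hdropb]
      simp only [tp']
      by_cases hw : sb[j] > sa[i]
      · rw [if_pos hw, if_pos hw, ih (i+1) (j+1) (answer+1) (by omega)]
        ring
      · rw [if_neg hw, if_neg hw, ih i (j+1) answer (by omega), hdropa]
    · rw [solutionLoop, if_neg hc]
      rcases Nat.lt_or_ge i N with hi | hi
      · have hj : N ≤ j := by omega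
        rw [show ((sb.take N).drop j : List Int) = [] from
          List.drop_eq_nil_of_le (by simp [List.length_take]; omega)]
        rw [tp'_nil_right]
        ring
      · rw [show (sa.drop i : List Int) = [] from List.drop_eq_nil_of_le (by omega)]
        rw [tp'_zero_nil]
        ring

theorem bInner_le (bs : List Int) (a : Int) : ∀ (k avail : Nat), (bInner bs a k avail).1 ≤ k := by
  intro k
  induction k with
  | zero => intro avail; simp [bInner]
  | succ k ih =>
    intro avail
    rw [bInner]
    by_cases h : PySem.List.pyGetD bs (((k : Int) + 1) - 1) 0 > a
    · rw [if_pos h]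
      exact (ih (avail + 1)).trans (Nat.le_succ k)
    · rw [if_neg h]

theorem bInner_dw (bs : List Int) (a : Int) (as : List Int) :
    ∀ (k avail : Nat), k ≤ bs.length →
      dw (a :: as) ((bs.take k).reverse) avail =
        (if 0 < (bInner bs a k avail).2
         then 1 + dw as ((bs.take (bInner bs a k avail).1).reverse) ((bInner bs a k avail).2 - 1)
         else dw as ((bs.take (bInner bs a k avail).1).reverse) (bInner bs a k avail).2) := by
  intro k
  induction k with
  | zero =>
    intro avail _
    simp only [bInner, List.take_zero, List.reverse_nil]
    simp only [dw]
  | succ k ih =>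
    intro avail hk
    have hble : k < bs.length := by omega
    have hgd : PySem.List.pyGetD bs (((k : Int) + 1) - 1) 0 = bs[k] := by
      rw [show (((k : Int) + 1) - 1 : Int) = (k : Int) from by ring]
      rw [PySem.List.pyGetD_natCast]
      exact List.getD_eq_getElem bs 0 hble
    have htake : (bs.take (k + 1)).reverse = bs[k] :: (bs.take k).reverse := by
      rw [List.take_add_one, List.getElem?_eq_getElem hble]
      simp
    rw [bInner, hgd, htake]
    by_cases hw : bs[k] > a
    · rw [if_pos hw]
      rw [show (dw (a :: as) (bs[k] :: (bs.take k).reverse) avail : Int) =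
        dw (a :: as) ((bs.take k).reverse) (avail + 1) from by
        simp only [dw]; rw [if_pos hw]]
      exact ih (avail + 1) (by omega)
    · rw [if_neg hw]
      rw [show (dw (a :: as) (bs[k] :: (bs.take k).reverse) avail : Int) =
        if 0 < avail then 1 + dw as (bs[k] :: (bs.take k).reverse) (avail - 1)
        else dw as (bs[k] :: (bs.take k).reverse) avail from by
        simp only [dw]; rw [if_neg hw]]
      rw [htake]

theorem foldB_eq (bs : List Int) : ∀ (as : List Int) (k avail : Nat) (ans : Int), k ≤ bs.length →
    (as.foldl
      (fun (st : Nat × Nat × Int) a =>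
        let p := bInner bs a st.1 st.2.1
        if 0 < p.2 then (p.1, p.2 - 1, st.2.2 + 1) else (p.1, p.2, st.2.2))
      (k, avail, ans)).2.2 = ans + dw as ((bs.take k).reverse) avail := by
  intro as
  induction as with
  | nil => intro k avail ans _; simp [dw]
  | cons a as ih =>
    intro k avail ans hk
    rw [List.foldl_cons]
    have hle : (bInner bs a k avail).1 ≤ bs.length := (bInner_le bs a k avail).trans hk
    have hdw := bInner_dw bs a as k avail hk
    show (List.foldl _
      (if 0 < (bInner bs a k avail).2
       then ((bInner bs a k avail).1, (bInner bs a k avail).2 - 1, ans + 1)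
       else ((bInner bs a k avail).1, (bInner bs a k avail).2, ans)) as).2.2 = _
    by_cases h : 0 < (bInner bs a k avail).2
    · rw [if_pos h, ih _ _ _ hle, hdw, if_pos h]
      ring
    · rw [if_neg h, ih _ _ _ hle, hdw, if_neg h]

-- ===== VERDICT (by name: the statement is the Claim_ definition above) =====
theorem solution_spec : Claim_equal_solution := by
  intro A B hdom hpre
  unfold Spec_solution
  unfold Pre_solution at hpre
  have hlsa : (PySem.List.sorted A (fun x => x) false).length = A.length :=
    PySem.List.length_sorted A (fun x => x) false
  have hlsb : (PySem.List.sorted B (fun x => x) false).length = B.length :=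
    PySem.List.length_sorted B (fun x => x) false
  set N := A.length with hN
  set sa := PySem.List.sorted A (fun x => x) false with hsa
  set sb := PySem.List.sorted B (fun x => x) false with hsb
  have hNsb : N ≤ sb.length := by omega
  set bsp := sb.take N with hbsp
  have hlbsp : bsp.length = N := by
    rw [hbsp, List.length_take]
    omega
  have hsap : sa.Pairwise (· ≤ ·) := PySem.List.sorted_pairwise A (fun x => x)
  have hbspp : bsp.Pairwise (· ≤ ·) :=
    (PySem.List.sorted_pairwise B (fun x => x)).sublist (List.take_sublist N sb)
  have hA : solution A B = tp' 0 sa bsp := by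
    show solutionLoop sa sb N N 0 0 0 = _
    rw [loopA_eq sa sb N hlsa hNsb N 0 0 0 (by omega)]
    simp [hbsp]
  have hB : solution_alt A B = dw sa.reverse bsp.reverse 0 := by
    show ((PySem.List.sorted A (fun x => x) true).foldl
      (fun (st : Nat × Nat × Int) a =>
        let p := bInner (PySem.List.slice sb none (some (N : Int))) a st.1 st.2.1
        if 0 < p.2 then (p.1, p.2 - 1, st.2.2 + 1) else (p.1, p.2, st.2.2))
      ((PySem.List.slice sb none (some (N : Int))).length, 0, (0 : Int))).2.2 = _
    rw [PySem.List.slice_to_natCast, ← hbsp, sorted_rev_eq, ← hsa]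
    rw [foldB_eq bsp sa.reverse bsp.length 0 0 (le_refl _)]
    rw [List.take_length]
    ring
  rw [hA, hB]
  rw [← TPM (sa.length + bsp.length) sa bsp rfl hbspp 0]
  rw [ballot (mergeA sa bsp) (by
    rw [cT_mergeA (sa.length + bsp.length) sa bsp rfl, cF_mergeA (sa.length + bsp.length) sa bsp rfl]
    omega)]
  rw [← revmerge (sa.length + bsp.length) sa bsp rfl hsap hbspp]
  rw [← DWM (sa.reverse.length + bsp.reverse.length) sa.reverse bsp.reverse rfl 0]
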